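-- pv_equiv track=rewrite | github.com/1fox3/mac-tools | package/model/Model.py | get_db_or_table_from_class_name
-- ===== SOURCE A (Python) =====
-- def get_db_or_table_from_class_name(class_name):
--     """根据类型获得数据库名或表名"""
--     db_or_table_str = ''
--     for i in range(len(class_name)):
--         is_upper = class_name[i].isupper()
--         is_digit = class_name[i].isdigit()
--         if is_upper or is_digit:
--             if 0 == i and is_upper:
--                 db_or_table_str += class_name[i].lower()
--             else:
--                 db_or_table_str += '_'
--                 if is_upper:
--                     db_or_table_str += class_name[i].lower()
--                 else:
--                     db_or_table_str += class_name[i]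
--         else:
--             db_or_table_str += class_name[i]
--     return db_or_table_str
-- ===== SOURCE B (Python) =====
-- def get_db_or_table_from_class_name(class_name):
--     """根据类型获得数据库名或表名"""
--     # Tokenize: each uppercase/digit character starts a new word; a word runs
--     # until the next uppercase/digit.  Lowercase each word's first character,
--     # then join the words with '_'.  A word starting at a digit keeps its
--     # underscore separator even at position 0, hence the prepend below.
--     words = []
--     i, n = 0, len(class_name)
--     while i < n:
--         j = i + 1
--         while j < n and not (class_name[j].isupper() or class_name[j].isdigit()):
--             j += 1
--         words.append(class_name[i].lower() + class_name[i + 1:j])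
--         i = j
--     joined = '_'.join(words)
--     if class_name and class_name[0].isdigit():
--         joined = '_' + joined
--     return joined
-- ===== Notes on version B (the rewrite author's own statement) =====
-- stated objective: alternative
-- what changed: B tokenizes the name into maximal words each starting at an uppercase/digit boundary (a while-loop scanner over index ranges), lowercases each word's first character and joins the words with '_' (prepending '_' when the name starts with a digit), instead of A's per-character emit loop with an in-loop i==0 branch.
import Mathlib
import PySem

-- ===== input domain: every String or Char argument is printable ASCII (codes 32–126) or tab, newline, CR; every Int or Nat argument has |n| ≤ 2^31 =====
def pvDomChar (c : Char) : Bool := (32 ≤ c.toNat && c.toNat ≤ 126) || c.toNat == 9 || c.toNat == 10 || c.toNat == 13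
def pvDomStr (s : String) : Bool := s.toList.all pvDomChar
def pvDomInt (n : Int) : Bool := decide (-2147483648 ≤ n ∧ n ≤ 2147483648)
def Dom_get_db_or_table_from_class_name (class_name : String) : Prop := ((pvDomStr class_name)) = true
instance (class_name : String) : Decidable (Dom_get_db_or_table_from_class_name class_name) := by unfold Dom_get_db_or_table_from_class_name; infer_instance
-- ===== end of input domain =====

-- B tokenizes the name into boundary-started words and joins them with '_' (alternative decomposition; same cost).


-- ===== PORT A =====
-- loop body of A: one iteration of 'for i in range(len(class_name))' appending to db_or_table_str
def pvStepA (acc : List Char) (ic : Int × Char) : List Char :=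
  let c := ic.2
  let is_upper := PySem.Chars.isupper c
  let is_digit := PySem.Chars.isdigit c
  if is_upper || is_digit then
    if (0 == ic.1) && is_upper then acc ++ [PySem.Chars.lowerChar c]
    else (acc ++ ['_']) ++ (if is_upper then [PySem.Chars.lowerChar c] else [c])
  else acc ++ [c]

def get_db_or_table_from_class_name (class_name : String) : String :=
  String.ofList ((PySem.List.enumerate class_name.toList).foldl pvStepA [])

-- ===== PORT B =====
-- a char that does NOT start a new word (neither uppercase nor a digit)
def pvPlain (c : Char) : Bool := !(PySem.Chars.isupper c || PySem.Chars.isdigit c)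

-- Source B's outer while loop: each word is the boundary char (lowercased) plus the
-- following run of plain chars (the inner while loop = takeWhile/dropWhile pvPlain)
def pvTokens : List Char → List (List Char)
  | [] => []
  | c :: rest =>
      (PySem.Chars.lowerChar c :: rest.takeWhile pvPlain) :: pvTokens (rest.dropWhile pvPlain)
termination_by cs => cs.length
decreasing_by
  simpa [Nat.lt_succ_iff] using rest.length_dropWhile_le pvPlain

def get_db_or_table_from_class_name_alt (class_name : String) : String :=
  let cs := class_name.toList
  let joined := List.intercalate ['_'] (pvTokens cs)
  match cs with
  | c :: _ =>
      if PySem.Chars.isdigit c then String.ofList ('_' :: joined) else String.ofList joined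
  | [] => String.ofList joined

-- ===== PRECONDITION & SPEC =====
def Spec_get_db_or_table_from_class_name (class_name : String) (out : String) : Prop := out = get_db_or_table_from_class_name_alt class_name
instance (class_name : String) (out : String) : Decidable (Spec_get_db_or_table_from_class_name class_name out) := by unfold Spec_get_db_or_table_from_class_name; infer_instance

-- ===== CLAIM =====
def Claim_equal_get_db_or_table_from_class_name : Prop := ∀ (class_name : String), Dom_get_db_or_table_from_class_name class_name → Spec_get_db_or_table_from_class_name class_name (get_db_or_table_from_class_name class_name)

-- ===== LEMMAS AND PROOFS =====
-- the per-char contribution of A's loop at an index i ≠ 0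
def pvSegB (c : Char) : List Char :=
  if PySem.Chars.isupper c then ['_', PySem.Chars.lowerChar c]
  else if PySem.Chars.isdigit c then ['_', c]
  else [c]

lemma pvStepA_nonzero (acc : List Char) (s : Int) (c : Char) (hs : (0 : Int) ≠ s) :
    pvStepA acc (s, c) = acc ++ pvSegB c := by
  have h0 : (0 == s) = false := by simpa using hs
  simp only [pvStepA, pvSegB, h0, Bool.false_and]
  by_cases hu : PySem.Chars.isupper c <;> by_cases hd : PySem.Chars.isdigit c <;>
    simp [hu, hd]

lemma foldA_tail : ∀ (cs acc : List Char) (s : Int), 1 ≤ s →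
    (PySem.List.enumerate cs s).foldl pvStepA acc = acc ++ cs.flatMap pvSegB := by
  intro cs
  induction cs with
  | nil => intro acc s _; simp [PySem.List.enumerate]
  | cons c rest ih =>
      intro acc s hs
      rw [PySem.List.enumerate_cons, List.foldl_cons,
        pvStepA_nonzero acc s c (by omega), ih _ (s + 1) (by omega)]
      simp

lemma lower_of_not_upper {c : Char} (h : PySem.Chars.isupper c = false) :
    PySem.Chars.lowerChar c = c := by
  simp [PySem.Chars.lowerChar, h]

lemma pvSegB_eq_pre (c : Char) :
    pvSegB c = (if PySem.Chars.isupper c || PySem.Chars.isdigit c then ['_'] else [])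
      ++ [PySem.Chars.lowerChar c] := by
  by_cases hu : PySem.Chars.isupper c
  · simp [pvSegB, hu]
  · by_cases hd : PySem.Chars.isdigit c <;>
      simp [pvSegB, hu, hd, lower_of_not_upper (by simpa using hu)]

lemma flatMap_plain (xs : List Char) (h : ∀ d ∈ xs, pvPlain d = true) :
    xs.flatMap pvSegB = xs := by
  induction xs with
  | nil => simp
  | cons d xs ih =>
      have hd := h d (by simp)
      simp only [pvPlain, Bool.not_eq_eq_eq_not, Bool.not_true, Bool.or_eq_false_iff] at hd
      simp [pvSegB, hd.1, hd.2, ih (fun e he => h e (by simp [he]))]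

lemma pvTokens_nil : pvTokens [] = [] := by simp [pvTokens]

lemma pvTokens_cons (c : Char) (rest : List Char) :
    pvTokens (c :: rest) =
      (PySem.Chars.lowerChar c :: rest.takeWhile pvPlain) :: pvTokens (rest.dropWhile pvPlain) := by
  simp [pvTokens]

lemma pvTokens_ne_nil (c : Char) (rest : List Char) : pvTokens (c :: rest) ≠ [] := by
  rw [pvTokens_cons]; simp

-- main structural lemma: flatMap pvSegB equals the joined tokens plus the
-- leading underscore contributed by an uppercase/digit head
lemma upper_not_digit {c : Char} (hu : PySem.Chars.isupper c = true) :
    PySem.Chars.isdigit c = false := by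
  simp only [PySem.Chars.isupper, Bool.and_eq_true, decide_eq_true_eq] at hu
  have h9 : ¬ (c ≤ '9') := fun hle => absurd (le_trans hu.1 hle) (by decide)
  simp [PySem.Chars.isdigit, h9]

lemma flatMap_eq_tokens : ∀ (n : Nat) (c : Char) (rest : List Char), rest.length ≤ n →
    (c :: rest).flatMap pvSegB =
      (if PySem.Chars.isupper c || PySem.Chars.isdigit c then ['_'] else [])
        ++ List.intercalate ['_'] (pvTokens (c :: rest)) := by
  intro n
  induction n with
  | zero =>
      intro c rest hn
      have : rest = [] := List.eq_nil_of_length_eq_zero (Nat.le_zero.mp hn)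
      subst this
      simp [pvTokens_cons, pvTokens_nil, pvSegB_eq_pre c, List.intercalate]
  | succ n ih =>
      intro c rest hn
      have hsplit : rest = rest.takeWhile pvPlain ++ rest.dropWhile pvPlain :=
        (List.takeWhile_append_dropWhile).symm
      rw [pvTokens_cons]
      cases hdrop : rest.dropWhile pvPlain with
      | nil =>
          have hall : ∀ d ∈ rest, pvPlain d = true := by
            simpa using List.dropWhile_eq_nil_iff.mp hdrop
          have htw : rest.takeWhile pvPlain = rest := List.takeWhile_eq_self_iff.mpr hall
          simp [List.flatMap_cons, flatMap_plain rest hall, pvSegB_eq_pre c, htw,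
            pvTokens_nil, List.intercalate]
      | cons d drop' =>
          have hlen : drop'.length ≤ n := by
            have := rest.length_dropWhile_le pvPlain
            rw [hdrop] at this
            simp at this
            omega
          have hrec := ih d drop' hlen
          have hdfalse : pvPlain d = false := by
            have := List.head_dropWhile_not pvPlain (l := rest) (by simp [hdrop])
            simpa [hdrop] using this
          have hdud : (PySem.Chars.isupper d || PySem.Chars.isdigit d) = true := by
            cases hx : (PySem.Chars.isupper d || PySem.Chars.isdigit d) with
            | true => rfl
            | false => simp [pvPlain, hx] at hdfalse
          have htake : ∀ e ∈ rest.takeWhile pvPlain, pvPlain e = true :=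
            fun e he => List.mem_takeWhile_imp he
          calc (c :: rest).flatMap pvSegB
              = pvSegB c ++ ((rest.takeWhile pvPlain).flatMap pvSegB
                ++ (rest.dropWhile pvPlain).flatMap pvSegB) := by
                conv_lhs => rw [List.flatMap_cons, hsplit]
                rw [List.flatMap_append]
            _ = pvSegB c ++ (rest.takeWhile pvPlain
                ++ (['_'] ++ List.intercalate ['_'] (pvTokens (d :: drop')))) := by
                rw [flatMap_plain _ htake, hdrop, hrec, if_pos hdud]
            _ = (if PySem.Chars.isupper c || PySem.Chars.isdigit c then ['_'] else [])
                ++ List.intercalate ['_']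
                  ((PySem.Chars.lowerChar c :: rest.takeWhile pvPlain) :: pvTokens (d :: drop')) := by
                cases htoks : pvTokens (d :: drop') with
                | nil => exact absurd htoks (pvTokens_ne_nil d drop')
                | cons t ts =>
                    rw [pvSegB_eq_pre c]
                    simp [List.intercalate, List.intersperse]

-- ===== VERDICT =====
theorem get_db_or_table_from_class_name_spec : Claim_equal_get_db_or_table_from_class_name := by
  intro class_name _
  unfold Spec_get_db_or_table_from_class_name get_db_or_table_from_class_name
    get_db_or_table_from_class_name_alt
  cases h : class_name.toList with
  | nil => simp [PySem.List.enumerate, pvTokens_nil, List.intercalate]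
  | cons c rest =>
      show String.ofList ((PySem.List.enumerate (c :: rest) 0).foldl pvStepA []) =
        if PySem.Chars.isdigit c then
          String.ofList ('_' :: List.intercalate ['_'] (pvTokens (c :: rest)))
        else String.ofList (List.intercalate ['_'] (pvTokens (c :: rest)))
      rw [PySem.List.enumerate_cons, List.foldl_cons]
      have hfirst : pvStepA [] (0, c)
          = if PySem.Chars.isupper c then [PySem.Chars.lowerChar c] else pvSegB c := by
        by_cases hu : PySem.Chars.isupper c <;> by_cases hd : PySem.Chars.isdigit c <;>
          simp [pvStepA, pvSegB, hu, hd]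
      rw [hfirst, foldA_tail rest _ (0 + 1) (by omega)]
      have hmain := flatMap_eq_tokens rest.length c rest le_rfl
      rw [List.flatMap_cons, pvSegB_eq_pre c, List.append_assoc] at hmain
      have h2 : [PySem.Chars.lowerChar c] ++ rest.flatMap pvSegB
          = List.intercalate ['_'] (pvTokens (c :: rest)) :=
        List.append_cancel_left hmain
      by_cases hu : PySem.Chars.isupper c
      · rw [if_pos hu, if_neg (by simp [upper_not_digit hu]), h2]
      · rw [lower_of_not_upper (by simpa using hu)] at h2
        rw [if_neg hu]
        by_cases hd : PySem.Chars.isdigit c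
        · rw [if_pos hd]
          have : pvSegB c = ['_', c] := by simp [pvSegB, hu, hd]
          rw [this, ← h2]
          simp
        · rw [if_neg hd]
          have : pvSegB c = [c] := by simp [pvSegB, hu, hd]
          rw [this, ← h2]
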